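-- pv_equiv track=rewrite | github.com/golly-splorts/gollyx-klein-test-data | scripts/teams_swapout_newer.py | teams_byld
-- ===== SOURCE A (Python) =====
-- def teams_byld(teams):
--     d = {}
--     for team in teams:
--         lea = team['league']
--         div = team['division']
--         if (lea,div) in d:
--             d[(lea,div)] += [team]
--         else:
--             d[(lea,div)] = [team]
--     return d
-- ===== SOURCE B (Python) =====
-- def teams_byld(teams):
--     # Alternative decomposition: first collect the distinct (league, division)
--     # keys in first-occurrence order, then build each group with one filter pass.
--     keys = []
--     for team in teams:
--         k = (team['league'], team['division'])
--         if k not in keys: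
--             keys.append(k)
--     return {k: [t for t in teams if (t['league'], t['division']) == k]
--             for k in keys}
-- ===== Notes on version B (the rewrite author's own statement) =====
-- stated objective: alternative
-- what changed: B replaces A's single-pass dict accumulation with a two-phase algorithm: collect the distinct (league, division) keys in first-occurrence order, then build each group by filtering the team list per key.
import Mathlib
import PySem

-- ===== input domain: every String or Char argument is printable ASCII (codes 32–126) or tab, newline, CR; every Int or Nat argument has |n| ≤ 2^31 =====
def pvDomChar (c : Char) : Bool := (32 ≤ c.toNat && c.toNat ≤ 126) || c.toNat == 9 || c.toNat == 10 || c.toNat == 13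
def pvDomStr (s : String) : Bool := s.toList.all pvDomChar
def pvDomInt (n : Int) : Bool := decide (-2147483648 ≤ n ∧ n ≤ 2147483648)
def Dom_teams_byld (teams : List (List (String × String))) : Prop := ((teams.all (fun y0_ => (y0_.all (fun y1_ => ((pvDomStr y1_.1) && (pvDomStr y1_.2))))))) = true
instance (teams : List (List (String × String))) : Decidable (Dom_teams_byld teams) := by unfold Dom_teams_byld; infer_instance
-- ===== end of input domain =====

-- B groups teams by (league, division) by first collecting the distinct keys in
-- first-occurrence order and then filtering the list once per key, instead of A's
-- single dict-accumulation pass (objective: alternative decomposition, not faster).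

-- ===== PORT A =====
-- team['league'] / team['division']: first-match dict lookup. Pre_ guarantees both keys
-- exist, so the "" default is never consulted on admitted inputs (Python raises KeyError there).
def pvKey (team : List (String × String)) : String × String :=
  ((PySem.Dict.mk team).getD "league" "", (PySem.Dict.mk team).getD "division" "")

def teams_byld (teams : List (List (String × String))) : List (String × String × List (List (String × String))) :=
  (teams.foldl
    (fun d team =>
      let k := pvKey team
      if d.contains k then d.insert k (d.getD k [] ++ [team])
      else d.insert k [team])
    (PySem.Dict.empty : PySem.Dict (String × String) (List (List (String × String))))).items.map
      (fun p => (p.1.1, p.1.2, p.2))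

-- ===== PORT B =====
def teams_byld_alt (teams : List (List (String × String))) : List (String × String × List (List (String × String))) :=
  let keys := teams.foldl
    (fun ks team =>
      let k := pvKey team
      if ks.contains k then ks else ks ++ [k]) []
  keys.map (fun k => (k.1, k.2, teams.filter (fun t => pvKey t == k)))

-- ===== PRECONDITION & SPEC =====
-- Pre_ excludes exactly the inputs containing a team without a 'league' or 'division'
-- entry, on which the Python A raises KeyError.
def Pre_teams_byld (teams : List (List (String × String))) : Prop :=
  (teams.all (fun t => (PySem.Dict.mk t).contains "league" && (PySem.Dict.mk t).contains "division")) = true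
instance (teams : List (List (String × String))) : Decidable (Pre_teams_byld teams) := by unfold Pre_teams_byld; infer_instance
def pvWitness_teams_byld : (List (List (String × String))) :=
  [[("league", "A"), ("division", "X"), ("name", "t1")],
   [("league", "A"), ("division", "X"), ("name", "t2")],
   [("league", "B"), ("division", "X")]]
def Spec_teams_byld (teams : List (List (String × String))) (out : List (String × String × List (List (String × String)))) : Prop := out = teams_byld_alt teams
instance (teams : List (List (String × String))) (out : List (String × String × List (List (String × String)))) : Decidable (Spec_teams_byld teams out) := by unfold Spec_teams_byld; infer_instance

-- ===== CLAIM (what is proved, stated in full; the proofs are below) =====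
def Claim_equal_teams_byld : Prop := ∀ (teams : List (List (String × String))), Dom_teams_byld teams → Pre_teams_byld teams → Spec_teams_byld teams (teams_byld teams)

-- ===== LEMMAS AND PROOFS =====

-- Core equivalence: A's dict-accumulation fold, rendered as items-triples, equals B's
-- distinct-keys-then-filter construction (holds for every input; Pre_ is only needed
-- because the Python A raises where a key is missing).
theorem teams_byld_eq_alt (teams : List (List (String × String))) :
    teams_byld teams = teams_byld_alt teams := by
  unfold teams_byld teams_byld_alt
  have hstep : (fun (d : PySem.Dict (String × String) (List (List (String × String)))) team =>
        let k := pvKey team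
        if d.contains k then d.insert k (d.getD k [] ++ [team])
        else d.insert k [team])
      = fun d t => d.modify (pvKey t) [] (· ++ [t]) := by
    funext d t
    simp only []
    by_cases h : d.contains (pvKey t)
    · simp [h]; rfl
    · have hg : d.getD (pvKey t) [] = [] :=
        PySem.Dict.getD_of_not_contains d [] (by simpa using h)
      simp [h, PySem.Dict.modify, hg]
  have hB : (teams.foldl
      (fun ks team =>
        let k := pvKey team
        if ks.contains k then ks else ks ++ [k]) ([] : List (String × String)))
      = PySem.Set.ofList (teams.map pvKey) := by
    rw [← PySem.Set.update_nil_left, PySem.Set.update_map_eq_foldl_add]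
    rfl
  rw [hstep]
  set D := teams.foldl (fun d t => d.modify (pvKey t) [] (· ++ [t]))
      (PySem.Dict.empty : PySem.Dict (String × String) (List (List (String × String)))) with hD
  have hkeys : D.keys = PySem.Set.ofList (teams.map pvKey) := by
    rw [hD]
    rw [PySem.Dict.keys_foldl_modify_key (l := teams) (key := pvKey)
      (d0 := ([] : List (List (String × String)))) (f := fun _ t => (· ++ [t]))]
    simp [PySem.Dict.keys_empty, PySem.Set.update_nil_left]
  have hnd : D.keys.Nodup := by rw [hkeys]; exact PySem.Set.nodup_ofList _
  have hitems : D.items = D.keys.map (fun k => (k, D.getD k [])) :=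
    PySem.Dict.items_eq_map_keys D hnd []
  have hfold : D = (teams.map (fun t => (pvKey t, t))).foldl
      (fun d p => d.modify p.1 [] (· ++ [p.2])) PySem.Dict.empty := by
    rw [hD, List.foldl_map]
  have hgetD : ∀ c, D.getD c [] = teams.filter (fun t => pvKey t == c) := by
    intro c
    rw [hfold, PySem.Dict.getD_foldl_modify_append, PySem.Dict.getD_empty,
        List.filter_map, List.map_map]
    simp [Function.comp_def]
  rw [hB, hitems, hkeys, List.map_map]
  refine List.map_congr_left ?_
  intro k _
  simp [hgetD k]

-- ===== VERDICT (by name: the statement is the Claim_ definition above) =====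
theorem teams_byld_spec : Claim_equal_teams_byld := by
  intro teams _ _
  exact teams_byld_eq_alt teams
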